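-- pv_equiv track=rewrite | github.com/mohammadfaiizan/ProjectI | DSA/Problem/Graph/02_Depth_First_Search_DFS/1111_Maximum_Nesting_Depth_of_Two_Valid_Parentheses_Strings.py | maxDepthAfterSplit_greedy_balance
-- ===== SOURCE A (Python) =====
-- from typing import List
--
-- def maxDepthAfterSplit_greedy_balance(seq: str) -> List[int]:
--     """
--     Approach 4: Greedy Balancing Strategy
--
--     Greedily balance the depth between two subsequences.
--
--     Time: O(n), Space: O(1)
--     """
--     result = []
--     current_depth = 0
--
--     for char in seq:
--         if char == '(':
--             # Assign to A if current depth is even, B if odd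
--             assignment = current_depth % 2
--             result.append(assignment)
--             current_depth += 1
--         else:  # char == ')'
--             current_depth -= 1
--             # Match with corresponding opening parenthesis
--             assignment = current_depth % 2
--             result.append(assignment)
--
--     return result
-- ===== SOURCE B (Python) =====
-- from typing import List
--
-- def maxDepthAfterSplit_greedy_balance(seq: str) -> List[int]:
--     # Depth changes by +/-1 at every character, so the depth before index i
--     # always has parity i % 2; the assignment is therefore a pure function of
--     # the index parity and whether the char opens: no depth counter needed.
--     return [(i + (c != '(')) % 2 for i, c in enumerate(seq)]
-- ===== Notes on version B (the rewrite author's own statement) =====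
-- stated objective: simpler
-- what changed: B drops the running-depth state entirely: since every character shifts depth by exactly 1, depth parity equals index parity, so each output is computed locally from the index parity and whether the character is an opener, via a comprehension over enumerate(seq), replacing A's stateful branching loop.
import Mathlib
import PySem

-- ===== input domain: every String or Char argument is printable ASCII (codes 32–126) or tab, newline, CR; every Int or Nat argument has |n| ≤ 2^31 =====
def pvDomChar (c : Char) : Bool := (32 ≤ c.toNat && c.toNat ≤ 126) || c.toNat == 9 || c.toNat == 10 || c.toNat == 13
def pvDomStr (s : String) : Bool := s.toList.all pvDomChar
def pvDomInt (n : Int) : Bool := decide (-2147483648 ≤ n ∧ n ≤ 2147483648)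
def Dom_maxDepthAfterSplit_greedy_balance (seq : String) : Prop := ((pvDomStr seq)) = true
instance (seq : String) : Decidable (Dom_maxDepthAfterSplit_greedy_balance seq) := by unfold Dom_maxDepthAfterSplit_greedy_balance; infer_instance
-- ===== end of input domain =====

-- B removes A's running-depth state: depth parity equals index parity (each char shifts depth by ±1), so each output is computed locally from index parity and whether the char is an opener (objective: simpler).
-- ===== PORT A =====
-- one-pass loop: state (result, current_depth); '(' emits depth%2 then increments, else decrements then emits
def maxDepthAfterSplit_greedy_balance (seq : String) : List Int :=
  (seq.toList.foldl (fun (st : List Int × Int) c =>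
    if c = '(' then (st.1 ++ [PySem.Int.mod st.2 2], st.2 + 1)
    else (st.1 ++ [PySem.Int.mod (st.2 - 1) 2], st.2 - 1)) ([], 0)).1

-- ===== PORT B =====
-- B: stateless comprehension over enumerate(seq); answer = (i + (c != '(')) % 2
def maxDepthAfterSplit_greedy_balance_alt (seq : String) : List Int :=
  (PySem.List.enumerate seq.toList 0).map
    (fun p => PySem.Int.mod (p.1 + (if p.2 ≠ '(' then 1 else 0)) 2)

-- ===== PRECONDITION & SPEC =====
def Spec_maxDepthAfterSplit_greedy_balance (seq : String) (out : List Int) : Prop := out = maxDepthAfterSplit_greedy_balance_alt seq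
instance (seq : String) (out : List Int) : Decidable (Spec_maxDepthAfterSplit_greedy_balance seq out) := by unfold Spec_maxDepthAfterSplit_greedy_balance; infer_instance

-- ===== CLAIM (what is proved, stated in full; the proofs are below) =====
def Claim_equal_maxDepthAfterSplit_greedy_balance : Prop := ∀ (seq : String), Dom_maxDepthAfterSplit_greedy_balance seq → Spec_maxDepthAfterSplit_greedy_balance seq (maxDepthAfterSplit_greedy_balance seq)

-- ===== LEMMAS AND PROOFS =====
-- Invariant: A's loop from depth d, zipped against indices from s, matches B's
-- local formula whenever d and s have equal parity (they stay in lockstep: both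
-- move by 1 per character).
theorem pv_loop (cs : List Char) : ∀ (acc : List Int) (d s : Int),
    PySem.Int.mod d 2 = PySem.Int.mod s 2 →
    (cs.foldl (fun (st : List Int × Int) c =>
      if c = '(' then (st.1 ++ [PySem.Int.mod st.2 2], st.2 + 1)
      else (st.1 ++ [PySem.Int.mod (st.2 - 1) 2], st.2 - 1)) (acc, d)).1
    = acc ++ (PySem.List.enumerate cs s).map
        (fun p => PySem.Int.mod (p.1 + (if p.2 ≠ '(' then 1 else 0)) 2) := by
  induction cs with
  | nil => intro acc d s _; simp [PySem.List.enumerate]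
  | cons c cs ih =>
    intro acc d s hpar
    rw [PySem.Int.mod_eq_emod_of_pos (by norm_num), PySem.Int.mod_eq_emod_of_pos (by norm_num)] at hpar
    have hnext : PySem.Int.mod (d + 1) 2 = PySem.Int.mod (s + 1) 2 := by
      rw [PySem.Int.mod_eq_emod_of_pos (by norm_num), PySem.Int.mod_eq_emod_of_pos (by norm_num)]
      omega
    by_cases h : c = '('
    · simp only [List.foldl, if_pos h, PySem.List.enumerate_cons, List.map, ih _ _ _ hnext]
      simp only [h, List.append_assoc, List.cons_append, List.nil_append]
      congr 2
      · rw [PySem.Int.mod_eq_emod_of_pos (by norm_num), PySem.Int.mod_eq_emod_of_pos (by norm_num)]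
        simpa using hpar
    · have hnext' : PySem.Int.mod (d - 1) 2 = PySem.Int.mod (s + 1) 2 := by
        rw [PySem.Int.mod_eq_emod_of_pos (by norm_num), PySem.Int.mod_eq_emod_of_pos (by norm_num)]
        omega
      simp only [List.foldl, if_neg h, PySem.List.enumerate_cons, List.map, ih _ _ _ hnext']
      simp only [List.append_assoc, List.cons_append, List.nil_append]
      congr 2
      · rw [hnext']
        simp [h]

theorem maxDepthAfterSplit_greedy_balance_spec : Claim_equal_maxDepthAfterSplit_greedy_balance := by
  intro seq _
  unfold Spec_maxDepthAfterSplit_greedy_balance maxDepthAfterSplit_greedy_balance maxDepthAfterSplit_greedy_balance_alt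
  simpa using pv_loop seq.toList [] 0 0 rfl
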